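-- pv_equiv track=rewrite | github.com/downgutzdev/Agents-Backend-MIRAI | app/utils/session_batch.py | merge_evaluations
-- ===== SOURCE A (Python) =====
-- from typing import List, Dict
--
-- def _dedup_join(items: List[str], max_len: int) -> str:
--     """
--     Join unique non-empty strings with '; ' without exceeding max_len.
--     """
--     seen = set()
--     out = []
--     total = 0
--     for it in items:
--         it = (it or "").strip()
--         if not it:
--             continue
--         key = it.lower()
--         if key in seen:
--             continue
--         seen.add(key)
--         add_len = len(it) + (2 if out else 0)  # accounts for "; "
--         if total + add_len > max_len:
--             break
--         out.append(it)
--         total += add_len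
--     return "; ".join(out)
--
-- def merge_evaluations(evals: List[Dict[str, str]]) -> Dict[str, str]:
--     """
--     Merge multiple evaluation dicts into a compact, de-duplicated summary.
--     """
--     sp = _dedup_join([e.get("strong_points", "") for e in evals], max_len=450)
--     wp = _dedup_join([e.get("weak_points", "") for e in evals], max_len=450)
--     gc = _dedup_join([e.get("general_comments", "") for e in evals], max_len=600)
--     return {
--         "strong_points": sp,
--         "weak_points":  wp,
--         "general_comments": gc,
--     }
-- ===== SOURCE B (Python) =====
-- from typing import List, Dict
--
-- def _dedup_join(items: List[str], max_len: int) -> str: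
--     # pass 1: strip, drop empties, keep first occurrence per lowercased key
--     seen = set()
--     uniques = []
--     for raw in items:
--         s = (raw or "").strip()
--         if s and s.lower() not in seen:
--             seen.add(s.lower())
--             uniques.append(s)
--     # pass 2: greedy prefix under the length budget
--     out = []
--     total = 0
--     for s in uniques:
--         add_len = len(s) + (2 if out else 0)
--         if total + add_len > max_len:
--             break
--         out.append(s)
--         total += add_len
--     return "; ".join(out)
--
-- def merge_evaluations(evals: List[Dict[str, str]]) -> Dict[str, str]:
--     keys_limits = [("strong_points", 450), ("weak_points", 450), ("general_comments", 600)]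
--     return {k: _dedup_join([e.get(k, "") for e in evals], m) for k, m in keys_limits}
-- ===== Notes on version B (the rewrite author's own statement) =====
-- stated objective: alternative
-- what changed: _dedup_join's single loop interleaving dedup and the length budget (with break) is split into two sequential passes — a dedup pass producing the ordered unique stripped strings, then a greedy budget pass over that list — and merge_evaluations builds the result dict from a (key, limit) table comprehension instead of three explicit calls.
import Mathlib
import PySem

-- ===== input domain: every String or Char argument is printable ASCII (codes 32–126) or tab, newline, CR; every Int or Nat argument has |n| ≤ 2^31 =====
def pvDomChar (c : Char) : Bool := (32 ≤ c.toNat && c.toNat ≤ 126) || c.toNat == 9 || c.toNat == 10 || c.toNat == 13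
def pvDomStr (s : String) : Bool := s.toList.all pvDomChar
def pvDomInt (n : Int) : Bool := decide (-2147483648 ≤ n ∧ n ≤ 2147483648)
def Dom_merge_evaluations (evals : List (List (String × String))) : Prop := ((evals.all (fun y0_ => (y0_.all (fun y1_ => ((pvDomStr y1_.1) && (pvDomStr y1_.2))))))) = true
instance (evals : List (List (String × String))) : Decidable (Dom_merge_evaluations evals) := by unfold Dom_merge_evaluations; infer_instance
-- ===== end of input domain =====

-- B splits A's single break-carrying loop into two passes (dedup, then greedy budget prefix)
-- and builds the result dict from a (key, limit) table; objective: alternative decomposition.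

-- ===== PORT A =====
-- A's single loop: strip/skip-empty/dedup and the length budget interleaved, 'break' returns out
def dedupJoinLoopA (items : List String) (maxLen : Int)
    (seen : PySem.Set String) (out : List String) (total : Int) : List String :=
  match items with
  | [] => out
  | x :: xs =>
    let it := PySem.Str.strip (if x == "" then "" else x)   -- (it or "").strip()
    if it == "" then dedupJoinLoopA xs maxLen seen out total
    else
      let key := PySem.Str.lower it
      if PySem.Set.contains seen key then dedupJoinLoopA xs maxLen seen out total
      else
        let seen' := PySem.Set.add seen key
        let addLen : Int := PySem.Str.len it + (if out ≠ [] then 2 else 0)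
        if total + addLen > maxLen then out                   -- break
        else dedupJoinLoopA xs maxLen seen' (out ++ [it]) (total + addLen)

def dedupJoinA (items : List String) (maxLen : Int) : String :=
  PySem.Str.join "; " (dedupJoinLoopA items maxLen PySem.Set.empty [] 0)

def merge_evaluations (evals : List (List (String × String))) : List (String × String) :=
  let sp := dedupJoinA (evals.map (fun e => PySem.Dict.getD ⟨e⟩ "strong_points" "")) 450
  let wp := dedupJoinA (evals.map (fun e => PySem.Dict.getD ⟨e⟩ "weak_points" "")) 450
  let gc := dedupJoinA (evals.map (fun e => PySem.Dict.getD ⟨e⟩ "general_comments" "")) 600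
  [("strong_points", sp), ("weak_points", wp), ("general_comments", gc)]

-- ===== PORT B =====
-- pass 1: strip, drop empties, keep first occurrence per lowercased key
def dedupPassB (items : List String) (seen : PySem.Set String) (uniques : List String) : List String :=
  match items with
  | [] => uniques
  | raw :: xs =>
    let s := PySem.Str.strip (if raw == "" then "" else raw)
    if s != "" && !(PySem.Set.contains seen (PySem.Str.lower s)) then
      dedupPassB xs (PySem.Set.add seen (PySem.Str.lower s)) (uniques ++ [s])
    else
      dedupPassB xs seen uniques

-- pass 2: greedy prefix under the length budget
def greedyPassB (uniques : List String) (maxLen : Int) (out : List String) (total : Int) : List String :=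
  match uniques with
  | [] => out
  | s :: rest =>
    let addLen : Int := PySem.Str.len s + (if out ≠ [] then 2 else 0)
    if total + addLen > maxLen then out                       -- break
    else greedyPassB rest maxLen (out ++ [s]) (total + addLen)

def dedupJoinB (items : List String) (maxLen : Int) : String :=
  PySem.Str.join "; " (greedyPassB (dedupPassB items PySem.Set.empty []) maxLen [] 0)

def merge_evaluations_alt (evals : List (List (String × String))) : List (String × String) :=
  [("strong_points", (450 : Int)), ("weak_points", 450), ("general_comments", 600)].map
    (fun kl => (kl.1, dedupJoinB (evals.map (fun e => PySem.Dict.getD ⟨e⟩ kl.1 "")) kl.2))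

-- ===== PRECONDITION & SPEC =====
def Spec_merge_evaluations (evals : List (List (String × String))) (out : List (String × String)) : Prop := out = merge_evaluations_alt evals
instance (evals : List (List (String × String))) (out : List (String × String)) : Decidable (Spec_merge_evaluations evals out) := by unfold Spec_merge_evaluations; infer_instance

-- ===== CLAIM (what is proved, stated in full; the proofs are below) =====
def Claim_equal_merge_evaluations : Prop := ∀ (evals : List (List (String × String))), Dom_merge_evaluations evals → Spec_merge_evaluations evals (merge_evaluations evals)

-- ===== LEMMAS AND PROOFS =====
theorem strOrEmpty (x : String) : (if x == "" then "" else x) = x := by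
  by_cases h : x = "" <;> simp [h]

theorem dedupPassB_acc (items : List String) (seen : PySem.Set String) (acc : List String) :
    dedupPassB items seen acc = acc ++ dedupPassB items seen [] := by
  induction items generalizing seen acc with
  | nil => simp [dedupPassB]
  | cons raw xs ih =>
    simp only [dedupPassB, strOrEmpty]
    split
    · rw [ih, ih _ ([] ++ [_])]; simp
    · exact ih _ _

theorem loopA_eq_passes (items : List String) (maxLen : Int)
    (seen : PySem.Set String) (out : List String) (total : Int) :
    dedupJoinLoopA items maxLen seen out total
      = greedyPassB (dedupPassB items seen []) maxLen out total := by
  induction items generalizing seen out total with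
  | nil => simp [dedupJoinLoopA, dedupPassB, greedyPassB]
  | cons x xs ih =>
    simp only [dedupJoinLoopA, dedupPassB, strOrEmpty]
    by_cases he : PySem.Str.strip x = ""
    · simp [he, ih]
    · by_cases hc : PySem.Str.lower (PySem.Str.strip x) ∈ seen
      · simp [he, hc, ih]
      · rw [dedupPassB_acc]
        simp only [List.nil_append]
        simp [he, hc, greedyPassB, ih]

-- ===== VERDICT (by name: the statement is the Claim_ definition above) =====
theorem merge_evaluations_spec : Claim_equal_merge_evaluations := by
  intro evals _
  unfold Spec_merge_evaluations merge_evaluations merge_evaluations_alt dedupJoinA dedupJoinB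
  simp [loopA_eq_passes]
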